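-- pv_equiv track=rewrite | github.com/siederslebenEtAl2019/artificial-intelligence | src/bayes/util/digraphs.py | mirror
-- ===== SOURCE A (Python) =====
-- def forward_star(bst):
--     """
--     :param bst: a backward star. bst is a list of lists, bst[i] contains all predecessors of i
--     :return: the corresponding forward star fst. fst[i] contains all successors of i
--     """
--     n = len(bst)
--     fst = []
--     for j in range(n):
--         fst.append([])
--     for j in range(n):
--         for i in bst[j]:
--             fst[i].append(j)
--     return [tuple(s) for s in fst]
--
-- def mirror(bst):
--     n = len(bst)
--     if n == 0:
--         return []
--     fst = forward_star(bst)
--     fst.reverse()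
--     for i, preds in enumerate(fst):
--         aux = [n - j - 1 for j in preds]
--         aux.sort()
--         fst[i] = aux
--     return fst
-- ===== SOURCE B (Python) =====
-- def mirror(bst):
--     # Fused single pass: write each mirrored edge directly into its final slot,
--     # then sort each adjacency list (no forward_star table, reverse, or relabel loop).
--     # res[-1 - p] is the mirrored slot of node p, via Python's negative indexing.
--     n = len(bst)
--     res = [[] for _ in range(n)]
--     for j, preds in enumerate(bst):
--         for p in preds:
--             res[-1 - p].append(n - 1 - j)
--     for lst in res:
--         lst.sort()
--     return res
-- ===== Notes on version B (the rewrite author's own statement) =====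
-- stated objective: simpler
-- what changed: Replaces the three-phase pipeline (build forward_star table of tuples, list.reverse, then a relabel-and-sort loop) by one fused pass that appends each mirrored edge n-1-j directly into its final slot res[-1-p] (Python negative indexing), followed by sorting each list; no tuple conversion, no reverse, no relabel loop, no n==0 guard.
import Mathlib
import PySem

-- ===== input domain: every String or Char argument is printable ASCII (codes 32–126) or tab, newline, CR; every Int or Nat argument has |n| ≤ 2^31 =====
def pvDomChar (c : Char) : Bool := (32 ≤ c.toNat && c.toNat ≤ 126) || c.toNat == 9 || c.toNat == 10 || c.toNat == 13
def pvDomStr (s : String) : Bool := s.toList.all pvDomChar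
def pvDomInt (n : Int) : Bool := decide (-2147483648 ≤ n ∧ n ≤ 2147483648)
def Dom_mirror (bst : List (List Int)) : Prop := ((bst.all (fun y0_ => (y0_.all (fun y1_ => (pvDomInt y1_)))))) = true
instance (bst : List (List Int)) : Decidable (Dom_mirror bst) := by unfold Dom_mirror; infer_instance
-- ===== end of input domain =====

-- B is simpler: one fused pass writes each mirrored edge into its final slot res[-1-p] (Python's
-- negative indexing names the mirrored slot directly), then each list is sorted; no forward-star
-- table of tuples, no reverse, no relabel loop.

-- ===== PORT A =====
-- 'tbl[k].append(v)' with Python index semantics: negative k wraps; an out-of-range index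
-- raises IndexError in Python (such inputs are outside Pre_mirror; the port leaves tbl unchanged there).
def pvAppendAt (tbl : List (List Int)) (k : Int) (v : Int) : List (List Int) :=
  let n : Int := tbl.length
  let k' : Int := if k < 0 then k + n else k
  if 0 ≤ k' ∧ k' < n then tbl.modify k'.toNat (fun l => l ++ [v]) else tbl

def forwardStar (bst : List (List Int)) : List (List Int) :=
  let n := bst.length
  -- fst = []; for j in range(n): fst.append([])
  let fst0 : List (List Int) := (List.range n).foldl (fun a _ => a ++ [([] : List Int)]) []
  -- for j in range(n): for i in bst[j]: fst[i].append(j)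
  let fst1 := (List.range n).foldl
    (fun acc j => (bst.getD j []).foldl (fun a i => pvAppendAt a i (j : Int)) acc) fst0
  -- return [tuple(s) for s in fst]  (variable-length tuples are lists under the convention)
  fst1.map (fun s => s)

def mirror (bst : List (List Int)) : List (List Int) :=
  let n := bst.length
  if n == 0 then []
  else
    let fst := forwardStar bst
    let fstR := fst.reverse
    -- for i, preds in enumerate(fst): aux = [n - j - 1 for j in preds]; aux.sort(); fst[i] = aux
    -- (replaces each entry by a function of itself, i.e. a positional map)
    fstR.map (fun preds =>
      PySem.List.sorted (preds.map (fun j => (n : Int) - j - 1)) (fun x => x) false)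

-- ===== PORT B =====
def mirror_alt (bst : List (List Int)) : List (List Int) :=
  let n := bst.length
  -- res = [[] for _ in range(n)]
  let res0 : List (List Int) := List.replicate n []
  -- for j, preds in enumerate(bst): for p in preds: res[-1-p].append(n-1-j)
  let res := (PySem.List.enumerate bst 0).foldl
    (fun acc jp => jp.2.foldl
      (fun a p => pvAppendAt a (-1 - p) ((n : Int) - 1 - jp.1)) acc) res0
  -- for lst in res: lst.sort()
  res.map (fun l => PySem.List.sorted l (fun x => x) false)

-- ===== PRECONDITION & SPEC =====
-- Pre_ admits exactly the inputs on which Python A returns: every node id must be a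
-- valid Python index into the n lists, i.e. lie in [-n, n); outside that A raises IndexError.
def Pre_mirror (bst : List (List Int)) : Prop :=
  ∀ row ∈ bst, ∀ p ∈ row, -(bst.length : Int) ≤ p ∧ p < (bst.length : Int)
instance (bst : List (List Int)) : Decidable (Pre_mirror bst) := by unfold Pre_mirror; infer_instance

def pvWitness_mirror : List (List Int) := [[1], [0, -2], []]

def Spec_mirror (bst : List (List Int)) (out : List (List Int)) : Prop := out = mirror_alt bst
instance (bst : List (List Int)) (out : List (List Int)) : Decidable (Spec_mirror bst out) := by unfold Spec_mirror; infer_instance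

-- ===== CLAIM (what is proved, stated in full; the proofs are below) =====
def Claim_equal_mirror : Prop := ∀ (bst : List (List Int)), Dom_mirror bst → Pre_mirror bst → Spec_mirror bst (mirror bst)

-- ===== LEMMAS AND PROOFS =====

theorem pvAppendAt_length (tbl : List (List Int)) (k v : Int) :
    (pvAppendAt tbl k v).length = tbl.length := by
  unfold pvAppendAt
  dsimp only
  split <;> split <;> simp

-- the initial append loop of forward_star builds n empty lists
theorem foldl_range_append_nil (n : ℕ) :
    (List.range n).foldl (fun a _ => a ++ [([] : List Int)]) [] = List.replicate n [] := by
  induction n with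
  | zero => rfl
  | succ m ih =>
    rw [List.range_succ, List.foldl_append, ih, List.foldl_cons, List.foldl_nil,
      List.replicate_succ' (n := m)]

-- one in-range append, seen through reverse-and-relabel
theorem pvAppendAt_rev_map (g : Int → Int) (acc : List (List Int)) (p v : Int)
    (h0 : 0 ≤ p) (h1 : p < (acc.length : Int)) :
    pvAppendAt (acc.reverse.map (List.map g)) ((acc.length : Int) - 1 - p) (g v)
      = (pvAppendAt acc p v).reverse.map (List.map g) := by
  unfold pvAppendAt
  simp only [List.length_map, List.length_reverse]
  rw [if_neg (show ¬((acc.length : Int) - 1 - p < 0) by omega),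
    if_neg (show ¬(p < 0) by omega),
    if_pos (show (0 : Int) ≤ (acc.length : Int) - 1 - p ∧
      (acc.length : Int) - 1 - p < (acc.length : Int) by omega),
    if_pos (show (0 : Int) ≤ p ∧ p < (acc.length : Int) by omega)]
  apply List.ext_getElem
  · simp
  · intro q hq hq'
    simp only [List.length_modify, List.length_map, List.length_reverse] at hq
    rw [List.getElem_modify]
    rw [List.getElem_map, List.getElem_reverse]
    rw [List.getElem_map, List.getElem_reverse, List.getElem_modify]
    simp only [List.length_modify]
    by_cases hc : ((acc.length : Int) - 1 - p).toNat = q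
    · rw [if_pos hc, if_pos (by omega), List.map_append]
      simp only [List.map_cons, List.map_nil]
    · rw [if_neg hc, if_neg (by omega)]

-- a negative in-range Python index wraps by the list length
theorem pvAppendAt_wrap (acc : List (List Int)) (p v : Int)
    (h0 : -(acc.length : Int) ≤ p) (h1 : p < 0) :
    pvAppendAt acc p v = pvAppendAt acc (p + (acc.length : Int)) v := by
  unfold pvAppendAt
  dsimp only
  rw [if_pos h1, if_neg (show ¬(p + (acc.length : Int) < 0) by omega)]

-- B's negative index -1-p names the same slot as A's wrapped index, on any valid Python index
theorem pvAppendAt_rev_map_neg (g : Int → Int) (acc : List (List Int)) (p v : Int)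
    (h0 : -(acc.length : Int) ≤ p) (h1 : p < (acc.length : Int)) :
    pvAppendAt (acc.reverse.map (List.map g)) (-1 - p) (g v)
      = (pvAppendAt acc p v).reverse.map (List.map g) := by
  by_cases hp : p < 0
  · rw [pvAppendAt_wrap acc p v h0 hp,
      show (-1 - p) = (acc.length : Int) - 1 - (p + (acc.length : Int)) by ring]
    exact pvAppendAt_rev_map g acc (p + (acc.length : Int)) v (by omega) (by omega)
  · have hw := pvAppendAt_wrap (acc.reverse.map (List.map g)) (-1 - p) (g v)
      (by simp only [List.length_map, List.length_reverse]; omega) (by omega)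
    rw [hw, show (-1 - p + ((acc.reverse.map (List.map g)).length : Int))
        = (acc.length : Int) - 1 - p by simp only [List.length_map, List.length_reverse]; ring]
    exact pvAppendAt_rev_map g acc p v (by omega) h1

-- processing one row preserves the reverse-and-relabel relation between the tables
theorem row_inv (n : ℕ) (row : List Int) (j : Int)
    (hrow : ∀ p ∈ row, -(n : Int) ≤ p ∧ p < (n : Int)) :
    ∀ (acc : List (List Int)), acc.length = n →
    row.foldl (fun a p => pvAppendAt a (-1 - p) ((n : Int) - 1 - j))
        (acc.reverse.map (List.map (fun x => (n : Int) - x - 1)))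
      = (row.foldl (fun a i => pvAppendAt a i j) acc).reverse.map
          (List.map (fun x => (n : Int) - x - 1)) := by
  induction row with
  | nil => intro acc _; rfl
  | cons p t ih =>
    intro acc hlen
    have hp := hrow p (List.mem_cons_self ..)
    have h := pvAppendAt_rev_map_neg (fun x => (n : Int) - x - 1) acc p j
      (by rw [hlen]; exact hp.1) (by rw [hlen]; exact hp.2)
    beta_reduce at h
    rw [show (n : Int) - j - 1 = (n : Int) - 1 - j by ring] at h
    simp only [List.foldl_cons]
    rw [h]
    exact ih (fun q hq => hrow q (List.mem_cons_of_mem _ hq)) _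
      (by rw [pvAppendAt_length, hlen])

theorem row_foldl_length (row : List Int) (j : Int) (acc : List (List Int)) :
    (row.foldl (fun a i => pvAppendAt a i j) acc).length = acc.length := by
  induction row generalizing acc with
  | nil => rfl
  | cons p t ih => simp only [List.foldl_cons]; rw [ih, pvAppendAt_length]

-- the whole double loop preserves the relation
theorem table_inv (bst : List (List Int)) (hpre : Pre_mirror bst) (js : List Nat) :
    ∀ (acc : List (List Int)), acc.length = bst.length →
    js.foldl (fun acc j => (bst.getD j []).foldl
        (fun a p => pvAppendAt a (-1 - p) ((bst.length : Int) - 1 - (j : Int))) acc)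
      (acc.reverse.map (List.map (fun x => (bst.length : Int) - x - 1)))
      = (js.foldl (fun acc j => (bst.getD j []).foldl
          (fun a i => pvAppendAt a i (j : Int)) acc) acc).reverse.map
          (List.map (fun x => (bst.length : Int) - x - 1)) := by
  induction js with
  | nil => intro acc _; rfl
  | cons j t ih =>
    intro acc hlen
    have hrow : ∀ p ∈ bst.getD j [], -(bst.length : Int) ≤ p ∧ p < (bst.length : Int) := by
      intro p hp
      by_cases hj : j < bst.length
      · exact hpre bst[j] (List.getElem_mem hj) p (by rwa [List.getD_eq_getElem _ _ hj] at hp)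
      · rw [List.getD_eq_getElem?_getD, List.getElem?_eq_none (by omega)] at hp
        simp at hp
    simp only [List.foldl_cons]
    rw [row_inv bst.length (bst.getD j []) ((j : Nat) : Int) hrow acc hlen]
    exact ih _ (by rw [row_foldl_length, hlen])

theorem foldl_congr_rows {β : Type} (l : List Nat) (f g : β → Nat → β)
    (h : ∀ b, ∀ a ∈ l, f b a = g b a) :
    ∀ init, l.foldl f init = l.foldl g init := by
  induction l with
  | nil => intro _; rfl
  | cons a t ih =>
    intro init
    simp only [List.foldl_cons]
    rw [h init a (List.mem_cons_self ..)]
    exact ih (fun b x hx => h b x (List.mem_cons_of_mem _ hx)) _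

-- B's fold over enumerate(bst) equals the same fold over range(len(bst)) with bst[j]
theorem enum_foldl_eq {β : Type} (bst : List (List Int)) (G : β → Int → List Int → β) :
    ∀ init : β, (PySem.List.enumerate bst 0).foldl (fun acc jp => G acc jp.1 jp.2) init
      = (List.range bst.length).foldl (fun acc (j : Nat) => G acc (↑j) (bst.getD j [])) init := by
  induction bst using List.reverseRecOn with
  | nil => intro _; rfl
  | append_singleton ys y ih =>
    intro init
    have hpref : (List.range ys.length).foldl
        (fun acc (j : Nat) => G acc (↑j) ((ys ++ [y]).getD j [])) init
        = (List.range ys.length).foldl (fun acc (j : Nat) => G acc (↑j) (ys.getD j [])) init :=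
      foldl_congr_rows _ _ _
        (fun b a ha => by rw [List.getD_append ys [y] [] a (List.mem_range.mp ha)]) init
    have hlast : (ys ++ [y]).getD ys.length [] = y := by
      rw [List.getD_eq_getElem _ _ (by simp), List.getElem_append_right (by omega)]
      simp
    rw [PySem.List.enumerate_append, List.foldl_append, ih init,
      List.length_append, List.length_singleton, List.range_succ, List.foldl_append,
      hpref]
    simp only [PySem.List.enumerate_cons, PySem.List.enumerate_nil,
      List.foldl_cons, List.foldl_nil, zero_add]
    rw [hlast]

-- ===== VERDICT (by name: the statement is the Claim_ definition above) =====
theorem mirror_spec : Claim_equal_mirror := by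
  intro bst _ hpre
  unfold Spec_mirror mirror mirror_alt forwardStar
  by_cases hnil : bst = []
  · subst hnil; rfl
  have hne : (bst.length == 0) = false := by
    simp [List.length_eq_zero_iff, hnil]
  simp only [hne, Bool.false_eq_true, if_false, List.map_id_fun', id_eq]
  rw [enum_foldl_eq bst
    (fun acc j row => row.foldl
      (fun a p => pvAppendAt a (-1 - p) ((bst.length : Int) - 1 - j)) acc)]
  rw [foldl_range_append_nil]
  have hstart : (List.replicate bst.length ([] : List Int)) =
      ((List.replicate bst.length ([] : List Int)).reverse.map
        (List.map (fun x => (bst.length : Int) - x - 1))) := by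
    simp
  conv_rhs => rw [hstart]
  rw [table_inv bst hpre (List.range bst.length) _ (by simp)]
  rw [List.map_map]
  simp only [Function.comp_def]
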